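-- pv_equiv track=rewrite | github.com/coling154/Lab4 | ch03_transposition_cipher.py | scramble2Decrypt
-- ===== SOURCE A (Python) =====
-- def scramble2Decrypt(cipherText):
--     half_length = len(cipherText) // 2
--     evenChars = cipherText[half_length:]
--     oddChars = cipherText[:half_length]
--     plainText = ""
--
--     for i in range(half_length):
--         plainText = plainText + evenChars[i]
--         plainText = plainText + oddChars[i]
--
--     if len(oddChars) < len(evenChars):
--         plainText = plainText + evenChars[-1]
--
--     return plainText
-- ===== SOURCE B (Python) =====
-- def scramble2Decrypt(cipherText):
--     half_length = len(cipherText) // 2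
--     result = [None] * len(cipherText)
--     result[0::2] = cipherText[half_length:]
--     result[1::2] = cipherText[:half_length]
--     return ''.join(result)
-- ===== Notes on version B (the rewrite author's own statement) =====
-- stated objective: simpler
-- what changed: Replaces the index loop (with quadratic-prone string concatenation) and the odd-length tail fixup with preallocation and two strided slice assignments (even indices get the second half, odd indices the first half), joined once.
import Mathlib
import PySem

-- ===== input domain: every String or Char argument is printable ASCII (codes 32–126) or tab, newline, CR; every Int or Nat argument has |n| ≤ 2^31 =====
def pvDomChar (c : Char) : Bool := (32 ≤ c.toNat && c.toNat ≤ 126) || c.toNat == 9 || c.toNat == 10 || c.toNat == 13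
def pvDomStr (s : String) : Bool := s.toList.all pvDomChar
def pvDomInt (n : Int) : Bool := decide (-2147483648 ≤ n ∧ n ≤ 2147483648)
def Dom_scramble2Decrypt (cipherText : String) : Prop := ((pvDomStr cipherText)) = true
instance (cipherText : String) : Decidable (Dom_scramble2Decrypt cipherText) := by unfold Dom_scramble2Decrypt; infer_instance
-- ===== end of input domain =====

-- B replaces A's index loop and odd-length tail fixup with a single interleave of the
-- two halves (Python: preallocation + two strided slice assignments); objective: simpler.

-- ===== PORT A =====
-- literal transliteration: half = len//2, evenChars = s[half:], oddChars = s[:half],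
-- loop appending evenChars[i] then oddChars[i], then the tail fixup via evenChars[-1]
def scramble2Decrypt (cipherText : String) : String :=
  let cs := cipherText.toList
  let half : Int := PySem.Int.floordiv (PySem.Str.len cipherText) 2
  let evenChars := PySem.List.slice cs (some half) none
  let oddChars := PySem.List.slice cs none (some half)
  let plainText : List Char :=
    (PySem.List.pyRange 0 half 1).foldl
      (fun acc i =>
        (acc ++ [PySem.List.pyGetD evenChars i ' ']) ++ [PySem.List.pyGetD oddChars i ' ']) []
  let plainText :=
    if oddChars.length < evenChars.length then
      plainText ++ [PySem.List.pyGetD evenChars (-1) ' ']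
    else plainText
  String.ofList plainText

-- ===== PORT B =====
-- the strided slice assignment result[0::2] = second half, result[1::2] = first half
-- is exactly the alternating interleave of the two halves, second half first
def pvWeave : List Char → List Char → List Char
  | [], ys => ys
  | x :: xs, ys => x :: pvWeave ys xs
termination_by xs ys => xs.length + ys.length
decreasing_by simp; omega

def scramble2Decrypt_alt (cipherText : String) : String :=
  let cs := cipherText.toList
  let half := cs.length / 2
  String.ofList (pvWeave (cs.drop half) (cs.take half))

-- ===== PRECONDITION & SPEC =====
def Spec_scramble2Decrypt (cipherText : String) (out : String) : Prop := out = scramble2Decrypt_alt cipherText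
instance (cipherText : String) (out : String) : Decidable (Spec_scramble2Decrypt cipherText out) := by unfold Spec_scramble2Decrypt; infer_instance

-- ===== CLAIM (what is proved, stated in full; the proofs are below) =====
def Claim_equal_scramble2Decrypt : Prop := ∀ (cipherText : String), Dom_scramble2Decrypt cipherText → Spec_scramble2Decrypt cipherText (scramble2Decrypt cipherText)

-- ===== LEMMAS AND PROOFS =====

theorem pvWeave_eq_zip_flatMap (od ev : List Char)
    (h1 : od.length ≤ ev.length) (h2 : ev.length ≤ od.length + 1) :
    pvWeave ev od
      = (ev.zip od).flatMap (fun p => [p.1, p.2]) ++ ev.drop od.length := by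
  induction od generalizing ev with
  | nil =>
    cases ev with
    | nil => simp [pvWeave]
    | cons e es => simp [pvWeave]
  | cons o os ih =>
    cases ev with
    | nil => simp at h1
    | cons e es =>
      rw [pvWeave, pvWeave]
      simp only [List.zip_cons_cons, List.flatMap_cons, List.length_cons,
        List.drop_succ_cons]
      rw [ih es (by simpa using h1) (by simpa using h2)]
      simp

theorem pvLoop_eq (h : Nat) (ev od : List Char) (acc : List Char)
    (hev : h ≤ ev.length) (hod : h ≤ od.length) :
    (PySem.List.pyRange 0 (h : Int) 1).foldl
      (fun acc i =>
        (acc ++ [PySem.List.pyGetD ev i ' ']) ++ [PySem.List.pyGetD od i ' ']) acc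
      = acc ++ ((ev.take h).zip (od.take h)).flatMap (fun p => [p.1, p.2]) := by
  induction h generalizing acc with
  | zero => simp [PySem.List.pyRange]
  | succ k ih =>
    have hk : ((k : Int) + 1) = ((k + 1 : Nat) : Int) := by push_cast; ring
    rw [← hk, PySem.List.pyRange_one_succ_right (by positivity), List.foldl_append]
    rw [ih acc (by omega) (by omega)]
    simp only [List.foldl_cons, List.foldl_nil]
    rw [PySem.List.pyGetD_ofNat ev k ' ' (by omega),
        PySem.List.pyGetD_ofNat od k ' ' (by omega)]
    have hzip : (ev.take (k+1)).zip (od.take (k+1))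
        = (ev.take k).zip (od.take k) ++ [(ev[k], od[k])] := by
      rw [List.take_add_one, List.take_add_one,
          List.getElem?_eq_getElem (by omega), List.getElem?_eq_getElem (by omega)]
      rw [List.zip_append (by simp; omega)]
      simp [List.zip]
      try exact ⟨rfl, rfl⟩
    rw [hzip]
    simp
    try exact ⟨rfl, rfl⟩

theorem zip_take_left (a b : List Char) (n : Nat) (h : b.length ≤ n) :
    (a.take n).zip b = a.zip b := by
  induction b generalizing a n with
  | nil => simp
  | cons x xs ih =>
    cases a with
    | nil => simp
    | cons y ys =>
      cases n with
      | zero => simp at h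
      | succ m => simp [ih ys m (by simpa using h)]

theorem drop_length_sub_one (l : List Char) (h : l ≠ []) :
    l.drop (l.length - 1) = [l.getLast h] := by
  induction l with
  | nil => simp at h
  | cons x xs ih =>
    cases xs with
    | nil => simp
    | cons y ys =>
      simp only [List.length_cons, Nat.add_sub_cancel, List.drop_succ_cons] at *
      rw [List.getLast_cons (by simp)]
      simpa using ih (by simp)

-- ===== VERDICT (by name: the statement is the Claim_ definition above) =====
theorem scramble2Decrypt_spec : Claim_equal_scramble2Decrypt := by
  intro s _
  unfold Spec_scramble2Decrypt scramble2Decrypt scramble2Decrypt_alt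
  set cs := s.toList with hcs
  set n := cs.length with hn
  have hhalf : PySem.Int.floordiv (PySem.Str.len s) 2 = ((n / 2 : Nat) : Int) := by
    rw [PySem.Str.len_eq, ← hcs, ← hn]
    simp [PySem.Int.floordiv, Int.fdiv_eq_ediv]
  set h := n / 2 with hh
  simp only [hhalf]
  rw [PySem.List.slice_from_natCast, PySem.List.slice_to_natCast]
  set ev := cs.drop h with hev
  set od := cs.take h with hod
  have hevlen : ev.length = n - h := by simp [hev, hn]
  have hodlen : od.length = h := by simp [hod]; omega
  rw [pvLoop_eq h ev od [] (by omega) (by omega)]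
  rw [pvWeave_eq_zip_flatMap od ev (by omega) (by omega)]
  have htake_od : od.take h = od := by rw [← hodlen]; exact List.take_length ..
  have htake_ev : (ev.take h).zip od = ev.zip od :=
    zip_take_left ev od h (by omega)
  rw [htake_od, htake_ev, hodlen]
  congr 1
  by_cases hpar : h < ev.length
  · rw [if_pos hpar]
    have hne : ev ≠ [] := by
      intro he; rw [he] at hpar; simp at hpar
    rw [PySem.List.pyGetD_neg_one ev ' ' hne]
    congr 1
    have : h = ev.length - 1 := by omega
    rw [this, drop_length_sub_one ev hne]
  · rw [if_neg hpar]
    have : ev.length ≤ h := by omega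
    rw [List.drop_of_length_le this]
    simp
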